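-- pv_equiv track=rewrite | github.com/ManuelMonterrosas/Scipython-Book | Chapter 2 - The core python language I/2.7 Functions/P2.7.2 Division of factorial by digits.py | fact_div_sum
-- ===== SOURCE A (Python) =====
-- def fact(n: int):
--     "Return n!"
--     if n == 1:
--         return 1
--     else:
--         return n*fact(n-1)
--
-- def fact_div_sum(n:int):
--     "Return True if n! is divisible by the sum of the digits of n!, or False otherwise."
--     # Calculate the sum of the digits of n!
--     factorial = str(fact(n))
--     sum = 0
--     for i in range(len(factorial)):
--         sum += int(factorial[i])
--     if int(factorial) % sum == 0:  # this means it is divisible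
--         return True
--     else:
--         return False
-- ===== SOURCE B (Python) =====
-- def fact_div_sum(n: int):
--     "Return True if n! is divisible by the sum of the digits of n!, or False otherwise."
--     v = 1
--     for k in range(2, n + 1):
--         v *= k
--     s = 0
--     x = v
--     while x > 0:
--         s += x % 10
--         x //= 10
--     return v % s == 0
-- ===== Notes on version B (the rewrite author's own statement) =====
-- stated objective: simpler
-- what changed: B replaces the recursive factorial and the string round-trip (str, per-character int, int of the whole string) by an iterative product and an arithmetic digit-extraction loop (x % 10, x //= 10), never touching strings.
-- outside the precondition, e.g. on fact_div_sum(0): A raises RecursionError, B returns True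
import Mathlib
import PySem

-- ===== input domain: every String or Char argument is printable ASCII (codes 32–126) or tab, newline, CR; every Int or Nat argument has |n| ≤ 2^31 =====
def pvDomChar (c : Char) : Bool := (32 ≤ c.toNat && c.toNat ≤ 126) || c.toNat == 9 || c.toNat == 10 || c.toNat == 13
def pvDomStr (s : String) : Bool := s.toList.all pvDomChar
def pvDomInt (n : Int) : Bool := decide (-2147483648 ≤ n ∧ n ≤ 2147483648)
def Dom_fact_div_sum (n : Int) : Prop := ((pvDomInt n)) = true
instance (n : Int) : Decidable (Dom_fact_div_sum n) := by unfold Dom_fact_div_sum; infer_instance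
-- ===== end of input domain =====

-- B replaces A's recursive factorial and decimal string round-trip by an iterative
-- product and an arithmetic digit-extraction loop (objective: simpler).

-- ===== PORT A =====
-- A's `fact` recurses downward until its base case; the Nat fuel n.toNat only makes the
-- recursion total in Lean (inside Pre_ it is never exhausted before the base case).
def pvFactFuel : Nat → Int → Int
  | 0, _ => 1
  | f + 1, n => if n = 1 then 1 else n * pvFactFuel f (n - 1)

def pvFact (n : Int) : Int := pvFactFuel n.toNat n

-- hand port of Python int(c) for a one-character digit string (the only strings the
-- loop of A feeds it: characters of str(fact n)); exact there.
def pvIntOfChar (c : Char) : Int := ((c.toNat - '0'.toNat : Nat) : Int)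

-- hand port of Python int(s) for a non-empty all-digit decimal string (the only
-- string A feeds it: str(fact n) with fact n ≥ 1); exact there.
def pvIntOfDigits (cs : List Char) : Int :=
  ((cs.foldl (fun a c => a * 10 + (c.toNat - '0'.toNat)) 0 : Nat) : Int)

def fact_div_sum (n : Int) : Bool :=
  let factorial := PySem.Int.toStr (pvFact n)
  let sum := (PySem.List.pyRange 0 (PySem.Str.len factorial) 1).foldl
    (fun s i => s + pvIntOfChar ((PySem.Str.pyGet? factorial i).getD ' ')) 0
  if PySem.Int.mod (pvIntOfDigits factorial.toList) sum = 0 then true else false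

-- ===== PORT B =====
-- B's while loop: while x > 0: s += x % 10; x //= 10
def pvDigitSum (x s : Int) : Int :=
  if _h : 0 < x then pvDigitSum (PySem.Int.floordiv x 10) (s + PySem.Int.mod x 10) else s
termination_by x.toNat
decreasing_by
  have h1 : PySem.Int.floordiv x 10 = x / 10 := PySem.Int.floordiv_eq_ediv_of_pos (by omega)
  have h2 : x / 10 < x := by omega
  have h3 : 0 ≤ x / 10 := by omega
  omega

def fact_div_sum_alt (n : Int) : Bool :=
  let v := (PySem.List.pyRange 2 (n + 1) 1).foldl (fun a k => a * k) 1
  let s := pvDigitSum v 0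
  PySem.Int.mod v s = 0

-- ===== PRECONDITION & SPEC =====
-- Pre_ excludes exactly n ≤ 0, where A's recursive fact never reaches its base
-- case and raises RecursionError.
def Pre_fact_div_sum (n : Int) : Prop := 1 ≤ n
instance (n : Int) : Decidable (Pre_fact_div_sum n) := by unfold Pre_fact_div_sum; infer_instance

def pvWitness_fact_div_sum : Int := 3

def Spec_fact_div_sum (n : Int) (out : Bool) : Prop := out = fact_div_sum_alt n
instance (n : Int) (out : Bool) : Decidable (Spec_fact_div_sum n out) := by unfold Spec_fact_div_sum; infer_instance

-- ===== CLAIM (what is proved, stated in full; the proofs are below) =====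
def Claim_equal_fact_div_sum : Prop := ∀ (n : Int), Dom_fact_div_sum n → Pre_fact_div_sum n → Spec_fact_div_sum n (fact_div_sum n)

-- ===== LEMMAS AND PROOFS =====

-- the common factorial value
theorem pvFactFuel_eq (f : Nat) : ∀ (N : Nat), 1 ≤ N → N ≤ f →
    pvFactFuel f (N : Int) = (Nat.factorial N : Int) := by
  induction f with
  | zero => intro N h1 h2; omega
  | succ f ih =>
    intro N h1 h2
    by_cases hN : N = 1
    · subst hN; simp [pvFactFuel, Nat.factorial]
    · have h2' : (2 : Nat) ≤ N := by omega
      have : ((N : Int) - 1) = ((N - 1 : Nat) : Int) := by omega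
      rw [pvFactFuel, if_neg (by omega), this, ih (N - 1) (by omega) (by omega)]
      have hfact : Nat.factorial N = N * Nat.factorial (N - 1) := by
        conv_lhs => rw [show N = (N - 1) + 1 by omega]
        rw [Nat.factorial_succ]
        congr 1
        omega
      rw [hfact]
      push_cast
      ring

theorem pvFact_eq (n : Int) (h : 1 ≤ n) : pvFact n = (Nat.factorial n.toNat : Int) := by
  have : n = (n.toNat : Int) := by omega
  rw [pvFact, this]
  exact pvFactFuel_eq n.toNat n.toNat (by omega) le_rfl

theorem pvProd_eq (N : Nat) (h : 1 ≤ N) :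
    (PySem.List.pyRange 2 ((N : Int) + 1) 1).foldl (fun a k => a * k) 1 = (Nat.factorial N : Int) := by
  induction N with
  | zero => omega
  | succ N ih =>
    by_cases hN : N = 0
    · subst hN
      rw [PySem.List.pyRange_one_eq_nil (by omega)]
      simp [Nat.factorial]
    · have h2 : (2 : Int) ≤ (N : Int) + 1 := by omega
      have : ((N + 1 : Nat) : Int) + 1 = ((N : Int) + 1) + 1 := by push_cast; ring
      rw [this, PySem.List.pyRange_one_succ_right h2, List.foldl_append,
        ih (by omega)]
      simp [Nat.factorial_succ]
      ring

-- decimal representation: Nat.toDigits 10 agrees with the recursive spec pvRepr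
def pvRepr (m : Nat) : List Char :=
  if m < 10 then [Nat.digitChar m]
  else pvRepr (m / 10) ++ [Nat.digitChar (m % 10)]
termination_by m
decreasing_by exact Nat.div_lt_self (by omega) (by omega)

theorem toDigitsCore_eq (f : Nat) : ∀ (m : Nat) (acc : List Char), 0 < f → m < 10 ^ f →
    Nat.toDigitsCore 10 f m acc = pvRepr m ++ acc := by
  induction f with
  | zero => intro m acc h; omega
  | succ f ih =>
    intro m acc _ hm
    rw [Nat.toDigitsCore]
    by_cases h10 : m / 10 = 0
    · have hlt : m < 10 := by omega
      rw [if_pos h10, pvRepr, if_pos hlt, Nat.mod_eq_of_lt hlt]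
      simp
    · have hge : 10 ≤ m := by omega
      have hf : 0 < f := by
        by_contra hf
        have : f = 0 := by omega
        subst this; simp at hm; omega
      have hdiv : m / 10 < 10 ^ f := by
        have : m < 10 * 10 ^ f := by
          calc m < 10 ^ (f + 1) := hm
          _ = 10 * 10 ^ f := by ring
        omega
      rw [if_neg h10, ih (m / 10) _ hf hdiv]
      conv_rhs => rw [pvRepr]
      rw [if_neg (by omega)]
      simp

theorem toDigits_eq_pvRepr (m : Nat) : Nat.toDigits 10 m = pvRepr m := by
  have h : m < 10 ^ (m + 1) := by
    calc m < 10 ^ m := Nat.lt_pow_self (by norm_num)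
    _ ≤ 10 ^ (m + 1) := Nat.pow_le_pow_right (by norm_num) (by omega)
  rw [Nat.toDigits, toDigitsCore_eq (m + 1) m [] (by omega) h]
  simp

theorem pvIntOfChar_digitChar (d : Nat) (h : d < 10) :
    pvIntOfChar (Nat.digitChar d) = (d : Int) := by
  interval_cases d <;> rfl

theorem digitChar_val (d : Nat) (h : d < 10) :
    (Nat.digitChar d).toNat - 48 = d := by
  interval_cases d <;> rfl

-- A's character-sum over pvRepr equals the digit sum (Nat.digits 10 m).sum
theorem foldl_pvRepr_sum (m : Nat) (hm : 0 < m) : ∀ (S : Int),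
    (pvRepr m).foldl (fun s c => s + pvIntOfChar c) S = S + ((Nat.digits 10 m).sum : Int) := by
  induction m using Nat.strong_induction_on with
  | _ m ih =>
    intro S
    by_cases h10 : m < 10
    · rw [pvRepr, if_pos h10, Nat.digits_def' (by norm_num) hm,
        Nat.div_eq_of_lt h10, Nat.mod_eq_of_lt h10]
      simp [pvIntOfChar_digitChar m h10]
    · have hdpos : 0 < m / 10 := by omega
      rw [pvRepr, if_neg h10, List.foldl_append,
        ih (m / 10) (Nat.div_lt_self hm (by omega)) hdpos S,
        Nat.digits_def' (by norm_num) hm]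
      simp [pvIntOfChar_digitChar (m % 10) (Nat.mod_lt m (by omega))]
      ring

-- A's re-parse of pvRepr recovers the number
theorem parse_pvRepr (m : Nat) (hm : 0 < m) :
    (pvRepr m).foldl (fun a c => a * 10 + (c.toNat - '0'.toNat)) 0 = m := by
  induction m using Nat.strong_induction_on with
  | _ m ih =>
    by_cases h10 : m < 10
    · rw [pvRepr, if_pos h10]
      simp
      exact digitChar_val m h10
    · have hdpos : 0 < m / 10 := by omega
      rw [pvRepr, if_neg h10, List.foldl_append,
        ih (m / 10) (Nat.div_lt_self hm (by omega)) hdpos]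
      simp
      rw [digitChar_val (m % 10) (Nat.mod_lt m (by omega))]
      omega

-- B's while loop computes the same digit sum
theorem pvDigitSum_eq (m : Nat) : ∀ (s : Int),
    pvDigitSum (m : Int) s = s + ((Nat.digits 10 m).sum : Int) := by
  induction m using Nat.strong_induction_on with
  | _ m ih =>
    intro s
    by_cases hm : m = 0
    · subst hm; rw [pvDigitSum]; simp
    · have hfd : PySem.Int.floordiv (m : Int) 10 = ((m / 10 : Nat) : Int) := by
        exact_mod_cast PySem.Int.floordiv_natCast m 10
      have hmd : PySem.Int.mod (m : Int) 10 = ((m % 10 : Nat) : Int) := by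
        exact_mod_cast PySem.Int.mod_natCast m 10
      rw [pvDigitSum, dif_pos (by omega : (0:Int) < (m : Int)), hfd, hmd,
        ih (m / 10) (Nat.div_lt_self (by omega) (by omega)),
        show Nat.digits 10 m = m % 10 :: Nat.digits 10 (m / 10) from
          Nat.digits_def' (by norm_num) (by omega)]
      simp only [List.sum_cons]
      push_cast
      ring

-- the string str(fact n) is the decimal representation pvRepr
theorem toStr_toList_eq (F : Nat) :
    (PySem.Int.toStr (F : Int)).toList = pvRepr F := by
  rw [PySem.Int.toList_toStr, PySem.Int.toChars, if_neg (by omega)]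
  have : ((F : Int)).toNat = F := by omega
  rw [this, toDigits_eq_pvRepr]

theorem fact_div_sum_spec' (n : Int) (h : 1 ≤ n) : fact_div_sum n = fact_div_sum_alt n := by
  have hn : n = (n.toNat : Int) := by omega
  set N := n.toNat with hN
  have hN1 : 1 ≤ N := by omega
  set F := Nat.factorial N with hF
  have hFpos : 0 < F := Nat.factorial_pos N
  -- A's side
  have hA : fact_div_sum n =
      (if PySem.Int.mod (pvIntOfDigits (pvRepr F))
          ((pvRepr F).foldl (fun s c => s + pvIntOfChar c) 0) = 0 then true else false) := by
    show (if PySem.Int.mod (pvIntOfDigits (PySem.Int.toStr (pvFact n)).toList)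
        ((PySem.List.pyRange 0 (PySem.Str.len (PySem.Int.toStr (pvFact n))) 1).foldl
          (fun s i => s + pvIntOfChar ((PySem.Str.pyGet? (PySem.Int.toStr (pvFact n)) i).getD ' ')) 0) = 0
      then true else false) = _
    rw [pvFact_eq n h, ← hN, ← hF]
    have hchars : (PySem.Int.toStr (F : Int)).toList = pvRepr F := toStr_toList_eq F
    rw [show PySem.Str.len (PySem.Int.toStr (F : Int)) =
        ((PySem.Int.toStr (F : Int)).toList.length : Int) from PySem.Str.len_eq _]
    rw [show (fun (s : Int) (i : Int) =>
          s + pvIntOfChar ((PySem.Str.pyGet? (PySem.Int.toStr (F : Int)) i).getD ' ')) =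
        (fun (acc : Int) (j : Int) =>
          (fun (s : Int) (c : Char) => s + pvIntOfChar c) acc
            (PySem.List.pyGetD (PySem.Int.toStr (F : Int)).toList j ' ')) from rfl]
    rw [PySem.List.foldl_pyRange_zero_pyGetD' (PySem.Int.toStr (F : Int)).toList ' '
        (fun (s : Int) (c : Char) => s + pvIntOfChar c) 0]
    rw [hchars]
  -- B's side
  have hB : fact_div_sum_alt n =
      decide (PySem.Int.mod (F : Int) (pvDigitSum (F : Int) 0) = 0) := by
    unfold fact_div_sum_alt
    rw [hn, pvProd_eq N hN1, ← hF]
  rw [hA, hB]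
  -- both moduli coincide
  have hparse : pvIntOfDigits (pvRepr F) = (F : Int) := by
    unfold pvIntOfDigits
    rw [parse_pvRepr F hFpos]
  have hsumA : (pvRepr F).foldl (fun s c => s + pvIntOfChar c) 0
      = ((Nat.digits 10 F).sum : Int) := by
    rw [foldl_pvRepr_sum F hFpos 0]
    ring
  have hsumB : pvDigitSum (F : Int) 0 = ((Nat.digits 10 F).sum : Int) := by
    rw [pvDigitSum_eq F 0]
    ring
  rw [hparse, hsumA, hsumB]
  simp

-- ===== VERDICT (by name: the statement is the Claim_ definition above) =====
theorem fact_div_sum_spec : Claim_equal_fact_div_sum := by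
  intro n _ hpre
  exact fact_div_sum_spec' n hpre
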